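-- pv_equiv track=rewrite | github.com/CoNexDat/latam-ixp-obs | src/data/rv/v4/parse.py | eliminate_as_prepending
-- ===== SOURCE A (Python) =====
-- def eliminate_as_prepending(as_path):
--     """
--     Eliminate AS-prepending an AS-path might include.
--
--     Takes an AS-path as a list of string-ASNs and, if ASNs repeat in a row,
--     eliminates the repetitions such that each ASN appears once (if the AS-path
--     includes no loops).
--     """
--     j = 0
--     while(j < len(as_path) - 1):
--         asn = as_path[j]
--         while(as_path[j + 1] == asn):
--                 as_path.pop(j + 1)
--                 if (j == len(as_path) - 1):
--                     break
--         j += 1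
--     return as_path
-- ===== SOURCE B (Python) =====
-- def eliminate_as_prepending(as_path):
--     """
--     Eliminate AS-prepending an AS-path might include.
--
--     Single pass: keep the first element and every element that differs from
--     its predecessor (pairwise zip of the list with itself shifted by one).
--     Returns a fresh list; A mutates its argument in place, so equivalence is
--     about the return value only.
--     """
--     return as_path[:1] + [b for a, b in zip(as_path, as_path[1:]) if b != a]
-- ===== Notes on version B (the rewrite author's own statement) =====
-- stated objective: faster
-- what changed: Replaces A's nested while-loops that repeatedly pop(j+1) from the list with a single pairwise-zip pass keeping each element that differs from its predecessor; B returns a fresh list instead of mutating the argument in place, so equivalence covers the return value only.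
import Mathlib
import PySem

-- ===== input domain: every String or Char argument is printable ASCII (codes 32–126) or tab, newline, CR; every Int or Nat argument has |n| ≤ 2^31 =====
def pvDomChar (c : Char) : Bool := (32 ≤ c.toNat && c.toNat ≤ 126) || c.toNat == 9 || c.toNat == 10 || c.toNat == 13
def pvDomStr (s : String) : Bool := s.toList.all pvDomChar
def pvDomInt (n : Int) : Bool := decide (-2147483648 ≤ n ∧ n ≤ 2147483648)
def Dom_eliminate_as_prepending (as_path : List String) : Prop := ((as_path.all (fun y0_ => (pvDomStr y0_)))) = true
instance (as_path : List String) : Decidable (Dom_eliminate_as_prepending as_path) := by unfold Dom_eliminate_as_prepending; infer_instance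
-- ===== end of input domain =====

-- B collapses consecutive duplicates in one pairwise pass instead of A's nested pop loops;
-- A mutates its argument in place while B builds a fresh list, so the claim is about the return value only.

-- ===== PORT A =====
-- inner loop `while as_path[j+1] == asn: as_path.pop(j+1); if j == len(as_path)-1: break`:
-- the break fires exactly when index j+1 has fallen out of range, which is exactly when
-- pyGet? returns none (≠ some asn); pop(j+1) is ported step-exactly as take (j+1) ++ drop (j+2).
-- Structural recursion on a fuel bound: each iteration pops one element, so fuel = the
-- current list length (passed at each call site) always suffices and the loop is exact.
def pvPopLoop (asn : String) (fuel : Nat) (xs : List String) (j : Nat) : List String :=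
  match fuel with
  | 0 => xs
  | f + 1 =>
    if PySem.List.pyGet? xs ((j : Int) + 1) = some asn then
      pvPopLoop asn f (xs.take (j + 1) ++ xs.drop (j + 2)) j
    else xs

-- outer loop `while j < len(as_path) - 1: asn = as_path[j]; <inner>; j += 1`
-- (j ≥ 0 always, so `j < len - 1` over ℤ is `j + 1 < len` over ℕ; as_path[j] is in range here;
-- j increases each iteration, so fuel = the initial list length suffices)
def pvOuterLoop (fuel : Nat) (xs : List String) (j : Nat) : List String :=
  match fuel with
  | 0 => xs
  | f + 1 =>
    if j + 1 < xs.length then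
      pvOuterLoop f (pvPopLoop (PySem.List.pyGetD xs (j : Int) "") xs.length xs j) (j + 1)
    else xs

def eliminate_as_prepending (as_path : List String) : List String :=
  pvOuterLoop as_path.length as_path 0

-- ===== PORT B =====
-- `as_path[:1] + [b for a, b in zip(as_path, as_path[1:]) if b != a]`
def eliminate_as_prepending_alt (as_path : List String) : List String :=
  PySem.List.slice as_path none (some 1) ++
    ((as_path.zip (PySem.List.slice as_path (some 1) none)).filter
      (fun p => p.2 != p.1)).map Prod.snd

-- ===== PRECONDITION & SPEC =====
def Spec_eliminate_as_prepending (as_path : List String) (out : List String) : Prop := out = eliminate_as_prepending_alt as_path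
instance (as_path : List String) (out : List String) : Decidable (Spec_eliminate_as_prepending as_path out) := by unfold Spec_eliminate_as_prepending; infer_instance

-- ===== CLAIM (what is proved, stated in full; the proofs are below) =====
def Claim_equal_eliminate_as_prepending : Prop := ∀ (as_path : List String), Dom_eliminate_as_prepending as_path → Spec_eliminate_as_prepending as_path (eliminate_as_prepending as_path)

-- ===== LEMMAS AND PROOFS =====

-- common reference form: collapse consecutive duplicates, carrying the last kept element
def pvChomp (l : String) : List String → List String
  | [] => []
  | a :: t => if a = l then pvChomp l t else a :: pvChomp a t

def pvCanon : List String → List String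
  | [] => []
  | a :: t => a :: pvChomp a t

theorem pvCanon_dropWhile (l : String) (t : List String) :
    pvCanon (t.dropWhile (· == l)) = pvChomp l t := by
  induction t with
  | nil => rfl
  | cons a t ih =>
    by_cases h : a = l
    · have hb : (a == l) = true := by simp [h]
      simp [List.dropWhile, h, pvChomp, ih]
    · have hb : (a == l) = false := by simp [h]
      simp [List.dropWhile, hb, h, pvChomp, pvCanon]

theorem pvPopLoop_length_le (asn : String) (fuel : Nat) (xs : List String) (j : Nat) :
    (pvPopLoop asn fuel xs j).length ≤ xs.length := by
  induction fuel generalizing xs with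
  | zero => exact le_refl _
  | succ f ih =>
    rw [pvPopLoop]
    split
    · exact le_trans (ih _) (by simp; omega)
    · exact le_refl _

theorem pvPopLoop_eq (asn : String) (fuel : Nat) (xs : List String) (j : Nat)
    (hf : xs.length ≤ fuel + (j + 1)) :
    pvPopLoop asn fuel xs j = xs.take (j + 1) ++ (xs.drop (j + 1)).dropWhile (· == asn) := by
  induction fuel generalizing xs with
  | zero =>
    have hd : xs.drop (j + 1) = [] := List.drop_eq_nil_of_le (by omega)
    rw [pvPopLoop, hd]
    simp
    omega
  | succ f ih =>
    rw [pvPopLoop]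
    split
    · rename_i h
      have hin : ¬ PySem.List.pyGet? xs ((j : Int) + 1) = none := by simp [h]
      rw [PySem.List.pyGet?_eq_none_iff] at hin
      have hlt : j + 1 < xs.length := by
        rcases not_not.mp hin with ⟨_, hlt⟩; exact_mod_cast hlt
      have hget : xs[j + 1] = asn := by
        rw [show ((j:Int) + 1) = (((j+1 : Nat)) : Int) by push_cast; ring,
          PySem.List.pyGet?_ofNat xs (j+1) hlt] at h
        exact Option.some_injective _ h
      rw [ih _ (by simp; omega)]
      have h1 : (xs.take (j + 1) ++ xs.drop (j + 2)).take (j + 1) = xs.take (j + 1) := by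
        rw [List.take_append_of_le_length (by simp; omega)]
        simp
      have h2 : (xs.take (j + 1) ++ xs.drop (j + 2)).drop (j + 1) = xs.drop (j + 2) := by
        rw [List.drop_append_of_le_length (by simp; omega)]
        simp
      rw [h1, h2, List.drop_eq_getElem_cons hlt, hget]
      simp [List.dropWhile]
    · rename_i h
      by_cases hlt : j + 1 < xs.length
      · rw [show ((j:Int) + 1) = (((j+1 : Nat)) : Int) by push_cast; ring,
          PySem.List.pyGet?_ofNat xs (j+1) hlt] at h
        have hne : xs[j + 1] ≠ asn := fun he => h (by rw [he])
        have hb : (xs[j + 1] == asn) = false := by simp [hne]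
        rw [List.drop_eq_getElem_cons hlt]
        simp only [List.dropWhile, hb]
        rw [← List.drop_eq_getElem_cons hlt, List.take_append_drop]
      · have hd : xs.drop (j + 1) = [] := by simp; omega
        rw [hd]
        simp; omega

theorem pvOuterLoop_eq (fuel : Nat) (xs : List String) (j : Nat)
    (hf : xs.length ≤ fuel + j) :
    pvOuterLoop fuel xs j = xs.take j ++ pvCanon (xs.drop j) := by
  induction fuel generalizing xs j with
  | zero =>
    have hd : xs.drop j = [] := List.drop_eq_nil_of_le (by omega)
    rw [pvOuterLoop, hd]
    simp [pvCanon]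
    omega
  | succ f ih =>
    rw [pvOuterLoop]
    split
    · rename_i h
      have hj : j < xs.length := by omega
      have hasn : PySem.List.pyGetD xs (j : Int) "" = xs[j] := by
        rw [PySem.List.pyGetD_natCast]
        simp [List.getD_eq_getElem?_getD, hj]
      have hlen := pvPopLoop_length_le (PySem.List.pyGetD xs (j : Int) "") xs.length xs j
      rw [ih _ _ (by omega), pvPopLoop_eq _ _ _ _ (by omega), hasn]
      have h1 : ((xs.take (j + 1) ++ (xs.drop (j + 1)).dropWhile (· == xs[j])).take (j + 1))
          = xs.take (j + 1) := by
        rw [List.take_append_of_le_length (by simp; omega)]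
        simp
      have h2 : ((xs.take (j + 1) ++ (xs.drop (j + 1)).dropWhile (· == xs[j])).drop (j + 1))
          = (xs.drop (j + 1)).dropWhile (· == xs[j]) := by
        rw [List.drop_append_of_le_length (by simp; omega)]
        simp
      have h3 : xs.take (j + 1) = xs.take j ++ [xs[j]] := by
        rw [List.take_add_one]; simp [List.getElem?_eq_getElem hj]
      rw [h1, h2, pvCanon_dropWhile, List.drop_eq_getElem_cons hj]
      simp [pvCanon]
      rw [h3, List.append_assoc]
      rfl
    · rename_i h
      by_cases hj : j < xs.length
      · have hd2 : xs.drop (j + 1) = [] := List.drop_eq_nil_of_le (by omega)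
        have hdrop : xs.drop j = [xs[j]] := by
          rw [List.drop_eq_getElem_cons hj, hd2]
        have hx : xs.take (j + 1) = xs := List.take_of_length_le (by omega)
        rw [hdrop]
        simp only [pvCanon, pvChomp]
        conv_lhs => rw [← hx, List.take_add_one]
        simp [List.getElem?_eq_getElem hj]
      · simp [List.drop_eq_nil_of_le (by omega : xs.length ≤ j), pvCanon,
          List.take_of_length_le (by omega : xs.length ≤ j)]

theorem pvZip_filter (t : List String) : ∀ a : String,
    ((((a :: t).zip t).filter (fun p => p.2 != p.1)).map Prod.snd) = pvChomp a t := by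
  induction t with
  | nil => intro a; rfl
  | cons b t ih =>
    intro a
    by_cases h : b = a
    · subst h
      simp [ih, pvChomp]
    · have hb : (b != a) = true := by simp [h]
      simp [hb, ih, pvChomp, h]

theorem pvAlt_eq (xs : List String) : eliminate_as_prepending_alt xs = pvCanon xs := by
  rw [eliminate_as_prepending_alt,
    show ((some (1:Int))) = some ((1:Nat):Int) from rfl,
    PySem.List.slice_to_natCast, PySem.List.slice_from_natCast]
  cases xs with
  | nil => rfl
  | cons a t =>
    simp only [List.take_succ_cons, List.drop_succ_cons, List.drop_zero]
    rw [pvZip_filter t a]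
    rfl

-- ===== VERDICT (by name: the statement is the Claim_ definition above) =====
theorem eliminate_as_prepending_spec : Claim_equal_eliminate_as_prepending := by
  intro as_path _
  show eliminate_as_prepending as_path = eliminate_as_prepending_alt as_path
  rw [pvAlt_eq, eliminate_as_prepending, pvOuterLoop_eq _ _ _ (by omega)]
  simp
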